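-- pv_equiv track=rewrite | github.com/Dalaska/wubidao | wubidao.py | build_level_set
-- ===== SOURCE A (Python) =====
-- from typing import Callable, Dict, Iterable, List, Mapping, MutableMapping, Sequence, Tuple, Any
--
-- def build_level_set(base_keys: Sequence[str], add_new: Mapping[int, str]) -> Dict[int, Tuple[str, ...]]:
--     level_set: Dict[int, Tuple[str, ...]] = {1: tuple(base_keys)}
--     current = list(base_keys)
--     for lvl in range(2, max(add_new.keys()) + 1):
--         nk = add_new.get(lvl)
--         if nk:
--             current.append(nk)
--         level_set[lvl] = tuple(current)
--     return level_set
-- ===== SOURCE B (Python) =====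
-- def build_level_set(base_keys, add_new):
--     top = max(add_new.keys())
--
--     def keys_upto(lvl):
--         # this level's tuple, recomputed from scratch: base keys plus every
--         # truthy addition at levels 2..lvl
--         return tuple(base_keys) + tuple(
--             add_new[l] for l in range(2, lvl + 1) if add_new.get(l)
--         )
--
--     return {1: tuple(base_keys), **{lvl: keys_upto(lvl) for lvl in range(2, top + 1)}}
-- ===== Notes on version B (the rewrite author's own statement) =====
-- stated objective: alternative
-- what changed: Drops A's mutating accumulator-and-snapshot loop entirely: each level's tuple is recomputed independently from scratch by its own filtered comprehension over levels 2..lvl, and the result is assembled as a single dict-merge of a comprehension.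
import Mathlib
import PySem

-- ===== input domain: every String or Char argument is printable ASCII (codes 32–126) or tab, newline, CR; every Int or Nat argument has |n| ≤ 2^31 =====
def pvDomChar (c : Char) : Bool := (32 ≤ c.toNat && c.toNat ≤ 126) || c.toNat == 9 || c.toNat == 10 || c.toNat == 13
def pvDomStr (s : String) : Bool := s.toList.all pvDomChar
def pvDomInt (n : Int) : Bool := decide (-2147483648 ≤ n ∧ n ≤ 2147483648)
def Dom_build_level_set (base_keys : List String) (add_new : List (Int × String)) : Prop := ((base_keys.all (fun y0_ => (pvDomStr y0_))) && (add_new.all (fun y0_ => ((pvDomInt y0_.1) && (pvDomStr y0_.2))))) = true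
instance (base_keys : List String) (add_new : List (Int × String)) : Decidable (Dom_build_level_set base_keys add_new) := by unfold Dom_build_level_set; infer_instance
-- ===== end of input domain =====

-- B abandons A's mutating accumulator-and-snapshot loop: each level's tuple is recomputed
-- independently from scratch by its own filtered comprehension; objective: alternative.
-- Output dict keys (1 and the levels of range(2, top+1)) are pairwise distinct, so each
-- Python dict assignment is a fresh-key insert and is ported as appending to the assoc list.

-- ===== PORT A =====
-- one iteration of A's loop: maybe-append the level's new key, snapshot it into the dict
def pvA_step (add_new : List (Int × String)) (st : List (Int × List String) × List String) (lvl : Int) : List (Int × List String) × List String :=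
  let cur := match (PySem.Dict.mk add_new).get? lvl with
    | some nk => if nk ≠ "" then st.2 ++ [nk] else st.2
    | none => st.2
  (st.1 ++ [(lvl, cur)], cur)

def build_level_set (base_keys : List String) (add_new : List (Int × String)) : List (Int × List String) :=
  match PySem.List.max? ((PySem.Dict.mk add_new).keys) (fun x => x) with
  | none => []  -- Python raises ValueError here (empty add_new); excluded by Pre_
  | some m =>
    ((PySem.List.pyRange 2 (m + 1) 1).foldl (pvA_step add_new) ([(1, base_keys)], base_keys)).1

-- ===== PORT B =====
-- what level l contributes in keys_upto's comprehension ([] or a singleton, empty string filtered out)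
def pvB_add (add_new : List (Int × String)) (l : Int) : List String :=
  match (PySem.Dict.mk add_new).get? l with
  | some nk => if nk ≠ "" then [nk] else []
  | none => []

-- keys_upto(lvl): the level's tuple, recomputed from scratch
def pvB_keys_upto (add_new : List (Int × String)) (base_keys : List String) (lvl : Int) : List String :=
  base_keys ++ (PySem.List.pyRange 2 (lvl + 1) 1).flatMap (pvB_add add_new)

def build_level_set_alt (base_keys : List String) (add_new : List (Int × String)) : List (Int × List String) :=
  match PySem.List.max? ((PySem.Dict.mk add_new).keys) (fun x => x) with
  | none => []  -- Python raises ValueError here (empty add_new); excluded by Pre_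
  | some top =>
    (1, base_keys) :: (PySem.List.pyRange 2 (top + 1) 1).map (fun lvl => (lvl, pvB_keys_upto add_new base_keys lvl))

-- ===== PRECONDITION & SPEC =====
-- Pre_ excludes only the empty dict, where Python's max() raises ValueError in both A and B.
def Pre_build_level_set (base_keys : List String) (add_new : List (Int × String)) : Prop := add_new ≠ []
instance (base_keys : List String) (add_new : List (Int × String)) : Decidable (Pre_build_level_set base_keys add_new) := by unfold Pre_build_level_set; infer_instance
def pvWitness_build_level_set : List String × (List (Int × String)) := (["a", "b"], [(2, "c"), (3, ""), (5, "d")])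

def Spec_build_level_set (base_keys : List String) (add_new : List (Int × String)) (out : List (Int × List String)) : Prop := out = build_level_set_alt base_keys add_new
instance (base_keys : List String) (add_new : List (Int × String)) (out : List (Int × List String)) : Decidable (Spec_build_level_set base_keys add_new out) := by unfold Spec_build_level_set; infer_instance

-- ===== CLAIM =====
def Claim_equal_build_level_set : Prop := ∀ (base_keys : List String) (add_new : List (Int × String)), Dom_build_level_set base_keys add_new → Pre_build_level_set base_keys add_new → Spec_build_level_set base_keys add_new (build_level_set base_keys add_new)

-- ===== LEMMAS AND PROOFS =====

-- A's maybe-append of a level equals appending that level's contribution pvB_add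
theorem pvA_cur_eq (add_new : List (Int × String)) (p : List String) (lvl : Int) :
    (match (PySem.Dict.mk add_new).get? lvl with
      | some nk => if nk ≠ "" then p ++ [nk] else p
      | none => p) = p ++ pvB_add add_new lvl := by
  unfold pvB_add
  cases (PySem.Dict.mk add_new).get? lvl with
  | none => simp
  | some nk => by_cases h : nk = "" <;> simp [h]

-- core invariant: after folding A's loop over levels 2..2+n-1, the dict is exactly
-- B's per-level recomputations, and A's running list is the full cumulative list.
theorem pv_fold_eq (add_new : List (Int × String)) (base_keys : List String) (n : Nat) :
    (PySem.List.pyRange 2 (2 + (n : Int)) 1).foldl (pvA_step add_new) ([(1, base_keys)], base_keys)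
      = ((1, base_keys) :: (PySem.List.pyRange 2 (2 + (n : Int)) 1).map
            (fun lvl => (lvl, pvB_keys_upto add_new base_keys lvl)),
         base_keys ++ (PySem.List.pyRange 2 (2 + (n : Int)) 1).flatMap (pvB_add add_new)) := by
  induction n with
  | zero =>
    rw [show ((2 : Int) + (0 : Nat)) = 2 by norm_num, PySem.List.pyRange_one_eq_nil le_rfl]
    simp
  | succ k ih =>
    have hcast : (2 + ((k + 1 : Nat) : Int)) = (2 + (k : Int)) + 1 := by push_cast; ring
    have hsplit : PySem.List.pyRange 2 (2 + ((k + 1 : Nat) : Int)) 1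
        = PySem.List.pyRange 2 (2 + (k : Int)) 1 ++ [2 + (k : Int)] := by
      rw [hcast, PySem.List.pyRange_one_succ_right (by omega)]
    rw [hsplit, List.foldl_append, ih]
    have hstep : pvA_step add_new
        ((1, base_keys) :: (PySem.List.pyRange 2 (2 + (k : Int)) 1).map
            (fun lvl => (lvl, pvB_keys_upto add_new base_keys lvl)),
         base_keys ++ (PySem.List.pyRange 2 (2 + (k : Int)) 1).flatMap (pvB_add add_new))
        (2 + (k : Int))
        = ((1, base_keys) :: (PySem.List.pyRange 2 (2 + (k : Int)) 1).map
              (fun lvl => (lvl, pvB_keys_upto add_new base_keys lvl))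
            ++ [(2 + (k : Int), base_keys ++ (PySem.List.pyRange 2 (2 + (k : Int)) 1).flatMap (pvB_add add_new) ++ pvB_add add_new (2 + (k : Int)))],
           base_keys ++ (PySem.List.pyRange 2 (2 + (k : Int)) 1).flatMap (pvB_add add_new) ++ pvB_add add_new (2 + (k : Int))) := by
      simp only [pvA_step, pvA_cur_eq]
    rw [List.foldl_cons, List.foldl_nil, hstep]
    have hupto : pvB_keys_upto add_new base_keys (2 + (k : Int))
        = base_keys ++ (PySem.List.pyRange 2 (2 + (k : Int)) 1).flatMap (pvB_add add_new) ++ pvB_add add_new (2 + (k : Int)) := by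
      unfold pvB_keys_upto
      rw [PySem.List.pyRange_one_succ_right (by omega), List.flatMap_append]
      simp [List.append_assoc]
    simp [hupto, List.append_assoc]

-- ===== VERDICT =====
theorem build_level_set_spec : Claim_equal_build_level_set := by
  intro base_keys add_new _ _
  unfold Spec_build_level_set build_level_set build_level_set_alt
  cases PySem.List.max? ((PySem.Dict.mk add_new).keys) (fun x => x) with
  | none => rfl
  | some m =>
    simp only
    by_cases hm : m + 1 ≤ 2
    · rw [PySem.List.pyRange_one_eq_nil hm]; simp
    · have hn : (2 + (((m - 1).toNat : Nat) : Int)) = m + 1 := by omega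
      rw [← hn, pv_fold_eq]
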